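-- pv_equiv track=rewrite | github.com/Viknesh-Rajaramon/Leetcode-Problems | Algorithms/Hard/3630_Partition_Array_for_Maximum_XOR_and_AND.py | maximizeXorAndXor
-- ===== SOURCE A (Python) =====
-- from typing import List
-- from itertools import combinations
--
-- def maximizeXorAndXor(nums: List[int]) -> int:
--     n = len(nums)
--     total_mask = (1 << 31) - 1
--     result = 0
--
--     def f(x: List[int]) -> int:
--         b = []
--         for v in x:
--             for y in b:
--                 v = min(v, v ^ y)
--
--             if v:
--                 b.append(v)
--
--         b.sort(reverse = True)
--         z = 0
--         for y in b:
--             z = max(z, z ^ y)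
--
--         return z
--
--     for r in range(min(4, n) + 1):
--         for c in combinations(range(n), r):
--             and_val = 0 if not c else nums[c[0]]
--             for i in c[1 : ]:
--                 and_val &= nums[i]
--
--             xor_val, t, s = 0, set(c), []
--             for i in range(n):
--                 if i not in t:
--                     xor_val ^= nums[i]
--                     s.append(nums[i])
--
--             mask = (~xor_val) & total_mask
--             s2 = [v & mask for v in s]
--             y = f(s2) if s2 else 0
--             result = max(result, xor_val + and_val + 2 * y)
--
--     return result
-- ===== SOURCE B (Python) =====
-- from typing import List
--
-- def maximizeXorAndXor(nums: List[int]) -> int: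
--     total_mask = (1 << 31) - 1
--
--     def f(x: List[int]) -> int:
--         b = []
--         for v in x:
--             for y in b:
--                 v = min(v, v ^ y)
--             if v:
--                 b.append(v)
--         b.sort(reverse=True)
--         z = 0
--         for y in b:
--             z = max(z, z ^ y)
--         return z
--
--     def best(i, k, and_val, xor_val, s):
--         # nums[i:] still undecided; k picks left for the AND group;
--         # and_val is None while the AND group is empty
--         if i == len(nums):
--             mask = (~xor_val) & total_mask
--             s2 = [v & mask for v in s]
--             y = f(s2) if s2 else 0
--             return xor_val + (0 if and_val is None else and_val) + 2 * y
--         v = nums[i]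
--         res = best(i + 1, k, and_val, xor_val ^ v, s + [v])
--         if k > 0:
--             res = max(res, best(i + 1, k - 1, v if and_val is None else and_val & v, xor_val, s))
--         return res
--
--     return max(0, best(0, 4, None, 0, []))
-- ===== Notes on version B (the rewrite author's own statement) =====
-- stated objective: alternative
-- what changed: B replaces the itertools.combinations enumeration of AND-group index tuples (with a per-combination O(n) rescan building xor_val and the remainder) by a single recursion that partitions the list element by element, carrying the AND accumulator, the running XOR of the rest and the rest list; the XOR-basis helper f and the leaf formula are unchanged.
import Mathlib
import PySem

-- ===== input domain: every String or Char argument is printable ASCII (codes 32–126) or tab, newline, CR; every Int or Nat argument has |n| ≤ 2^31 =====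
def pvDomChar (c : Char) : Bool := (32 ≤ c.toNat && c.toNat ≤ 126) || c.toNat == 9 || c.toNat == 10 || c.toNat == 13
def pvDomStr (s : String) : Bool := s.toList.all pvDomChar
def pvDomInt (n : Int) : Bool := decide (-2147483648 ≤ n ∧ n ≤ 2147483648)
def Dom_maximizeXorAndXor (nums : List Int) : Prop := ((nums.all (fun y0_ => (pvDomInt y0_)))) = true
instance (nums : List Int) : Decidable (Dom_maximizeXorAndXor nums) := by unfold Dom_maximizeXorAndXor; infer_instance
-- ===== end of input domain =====

-- B replaces the itertools.combinations enumeration (plus the per-combination O(n) rescan of the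
-- whole array for xor/remainder) by one recursive partition of the list that carries the AND
-- accumulator, the XOR of the rest and the rest itself; same return value (alternative structure).

-- ===== PORT A =====
-- A's nested helper f: greedy reduction, then sort descending, then a running max
def pvFA (x : List Int) : Int :=
  let b := x.foldl (fun b v =>
    let v := b.foldl (fun v y => min v (PySem.Int.bxor v y)) v
    if v ≠ 0 then b ++ [v] else b) []
  let b2 := PySem.List.sorted b (fun t => t) true
  b2.foldl (fun z y => max z (PySem.Int.bxor z y)) 0

def maximizeXorAndXor (nums : List Int) : Int :=
  let n : Int := PySem.List.len nums
  let total_mask : Int := ((1:Int) <<< (31:Nat)) - 1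
  (PySem.List.pyRange 0 (min 4 n + 1) 1).foldl (fun result r =>
    (PySem.List.combinations (PySem.List.pyRange 0 n 1) r.toNat).foldl (fun result c =>
      let and_val : Int :=
        match c with
        | [] => 0
        | i :: rest => rest.foldl (fun a j => PySem.Int.band a (PySem.List.pyGetD nums j 0))
            (PySem.List.pyGetD nums i 0)
      let p := (PySem.List.pyRange 0 n 1).foldl
        (fun (p : Int × List Int) i =>
          if i ∉ c then
            (PySem.Int.bxor p.1 (PySem.List.pyGetD nums i 0), p.2 ++ [PySem.List.pyGetD nums i 0])
          else p)
        (0, [])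
      let xor_val := p.1
      let s := p.2
      let mask := PySem.Int.band (Int.not xor_val) total_mask
      let s2 := s.map (fun v => PySem.Int.band v mask)
      let y := if s2 ≠ [] then pvFA s2 else 0
      max result (xor_val + and_val + 2 * y)) result) 0

-- ===== PORT B =====
-- B's helper f (same code as in Source B)
def pvFB (x : List Int) : Int :=
  let b := x.foldl (fun b v =>
    let v := b.foldl (fun v y => min v (PySem.Int.bxor v y)) v
    if v ≠ 0 then b ++ [v] else b) []
  let b2 := PySem.List.sorted b (fun t => t) true
  b2.foldl (fun z y => max z (PySem.Int.bxor z y)) 0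

-- Source B's conditional expressions 'v if and_val is None else and_val & v' / '0 if and_val is None else and_val'
def pvAndStep (and_val : Option Int) (v : Int) : Option Int :=
  match and_val with | none => some v | some a => some (PySem.Int.band a v)
def pvAVal (and_val : Option Int) : Int :=
  match and_val with | none => 0 | some a => a

-- B's recursion best(i, k, and_val, xor_val, s): the suffix nums[i:] is the list argument
def pvBest (l : List Int) (k : Nat) (and_val : Option Int) (xor_val : Int) (s : List Int) : Int :=
  match l with
  | [] =>
    let total_mask : Int := ((1:Int) <<< (31:Nat)) - 1
    let mask := PySem.Int.band (Int.not xor_val) total_mask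
    let s2 := s.map (fun v => PySem.Int.band v mask)
    let y := if s2 ≠ [] then pvFB s2 else 0
    xor_val + pvAVal and_val + 2 * y
  | v :: rest =>
    let res := pvBest rest k and_val (PySem.Int.bxor xor_val v) (s ++ [v])
    if 0 < k then
      max res (pvBest rest (k - 1) (pvAndStep and_val v) xor_val s)
    else res

def maximizeXorAndXor_alt (nums : List Int) : Int := max 0 (pvBest nums 4 none 0 [])

-- ===== PRECONDITION & SPEC =====
def Spec_maximizeXorAndXor (nums : List Int) (out : Int) : Prop := out = maximizeXorAndXor_alt nums
instance (nums : List Int) (out : Int) : Decidable (Spec_maximizeXorAndXor nums out) := by unfold Spec_maximizeXorAndXor; infer_instance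

-- ===== CLAIM (what is proved, stated in full; the proofs are below) =====
def Claim_equal_maximizeXorAndXor : Prop := ∀ (nums : List Int), Dom_maximizeXorAndXor nums → Spec_maximizeXorAndXor nums (maximizeXorAndXor nums)

-- ===== LEMMAS AND PROOFS =====

-- value of index i
def pvG (nums : List Int) (i : Int) : Int := PySem.List.pyGetD nums i 0

def pvIdx (nums : List Int) : List Int := PySem.List.pyRange 0 (PySem.List.len nums) 1

def pvAnd0 : List Int → Int
  | [] => 0
  | a :: t => t.foldl PySem.Int.band a

def pvXorF (z : Int) (l : List Int) : Int := l.foldl PySem.Int.bxor z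

-- the common leaf computation: candidate value from xor-value, and-value and the rest list
def pvCand (xv av : Int) (s : List Int) : Int :=
  let mask := PySem.Int.band (Int.not xv) (((1:Int) <<< (31:Nat)) - 1)
  let s2 := s.map (fun v => PySem.Int.band v mask)
  let y := if s2 ≠ [] then pvFA s2 else 0
  xv + av + 2 * y

-- partitions (chosen, rest) generated in B's recursion order, at most k chosen
def pvPick : List Int → Nat → List (List Int × List Int)
  | [], _ => [([], [])]
  | v :: rest, k =>
    (pvPick rest k).map (fun p => (p.1, v :: p.2)) ++
    (if 0 < k then (pvPick rest (k - 1)).map (fun p => (v :: p.1, p.2)) else [])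

-- combinations of size exactly r, paired with the complement (in order)
def pvCombosP : List Int → Nat → List (List Int × List Int)
  | l, 0 => [([], l)]
  | [], _ + 1 => []
  | x :: xs, r + 1 =>
    (pvCombosP xs r).map (fun p => (x :: p.1, p.2)) ++
    (pvCombosP xs (r + 1)).map (fun p => (p.1, x :: p.2))

-- all partitions with at most k chosen, grouped by size (A's enumeration order)
def pvCAll (l : List Int) (k : Nat) : List (List Int × List Int) :=
  (List.range (k + 1)).flatMap (fun r => pvCombosP l r)

def pvAndOpt (av : Option Int) (c : List Int) : Option Int := c.foldl pvAndStep av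

-- B-side candidate of a partition, with accumulators
def pvCandB (av : Option Int) (xv : Int) (s : List Int) (p : List Int × List Int) : Int :=
  pvCand (pvXorF xv p.2) (pvAVal (pvAndOpt av p.1)) (s ++ p.2)

-- A-side candidate of an index combination (rest recovered by filtering the index range)
def pvCandA (nums : List Int) (c : List Int) : Int :=
  pvCand (pvXorF 0 (((pvIdx nums).filter (fun i => decide (i ∉ c))).map (pvG nums)))
    (pvAnd0 (c.map (pvG nums)))
    (((pvIdx nums).filter (fun i => decide (i ∉ c))).map (pvG nums))

-- A-side candidate of an index partition
def pvCandP (nums : List Int) (p : List Int × List Int) : Int :=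
  pvCand (pvXorF 0 (p.2.map (pvG nums))) (pvAnd0 (p.1.map (pvG nums))) (p.2.map (pvG nums))

theorem pvAndOpt_some (t : List Int) (a : Int) :
    pvAndOpt (some a) t = some (t.foldl PySem.Int.band a) := by
  induction t generalizing a with
  | nil => rfl
  | cons v t ih => simpa [pvAndOpt, pvAndStep] using ih (PySem.Int.band a v)

theorem pvAVal_andOpt_none (c : List Int) : pvAVal (pvAndOpt none c) = pvAnd0 c := by
  cases c with
  | nil => rfl
  | cons a t =>
    rw [show pvAndOpt none (a :: t) = pvAndOpt (some a) t from rfl, pvAndOpt_some]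
    rfl

-- B's recursion computes the running max of pvCandB over pvPick
theorem pvBest_eq (l : List Int) : ∀ (k : Nat) (av : Option Int) (xv : Int) (s : List Int) (z : Int),
    max z (pvBest l k av xv s) = (pvPick l k).foldl (fun z p => max z (pvCandB av xv s p)) z := by
  induction l with
  | nil =>
    intro k av xv s z
    have hleaf : pvBest [] k av xv s = pvCandB av xv s ([], []) := by
      simp [pvBest, pvCandB, pvCand, pvXorF, pvAndOpt, pvFB, pvFA]
    rw [show pvPick [] k = [([], [])] from rfl]
    simp [hleaf]
  | cons v rest ih =>
    intro k av xv s z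
    have hu : (fun (z : Int) (q : List Int × List Int) => max z (pvCandB av xv s (q.1, v :: q.2)))
            = (fun z q => max z (pvCandB av (PySem.Int.bxor xv v) (s ++ [v]) q)) := by
      funext z q
      simp only [pvCandB]
      rw [List.append_cons s v q.2]
      rfl
    have hc : (fun (z : Int) (q : List Int × List Int) => max z (pvCandB av xv s (v :: q.1, q.2)))
            = (fun z q => max z (pvCandB (pvAndStep av v) xv s q)) := rfl
    rw [show pvPick (v :: rest) k
        = (pvPick rest k).map (fun p => (p.1, v :: p.2)) ++
          (if 0 < k then (pvPick rest (k - 1)).map (fun p => (v :: p.1, p.2)) else []) from rfl,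
      List.foldl_append, List.foldl_map, hu]
    by_cases hk : 0 < k
    · rw [if_pos hk, List.foldl_map, hc]
      rw [show pvBest (v :: rest) k av xv s
          = max (pvBest rest k av (PySem.Int.bxor xv v) (s ++ [v]))
              (pvBest rest (k - 1) (pvAndStep av v) xv s) from by simp [pvBest, hk]]
      rw [← max_assoc, ih k av (PySem.Int.bxor xv v) (s ++ [v]) z, ih (k - 1) (pvAndStep av v) xv s]
    · rw [if_neg hk, List.foldl_nil]
      rw [show pvBest (v :: rest) k av xv s
          = pvBest rest k av (PySem.Int.bxor xv v) (s ++ [v]) from by simp [pvBest, hk]]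
      exact ih k av (PySem.Int.bxor xv v) (s ++ [v]) z

-- A's inner scan over the index range
theorem pvScan (g : Int → Int) (c : List Int) (L : List Int) :
    ∀ (z : Int) (acc : List Int),
    L.foldl (fun (p : Int × List Int) i =>
        if i ∉ c then (PySem.Int.bxor p.1 (g i), p.2 ++ [g i]) else p) (z, acc)
      = (pvXorF z ((L.filter (fun i => decide (i ∉ c))).map g),
         acc ++ (L.filter (fun i => decide (i ∉ c))).map g) := by
  induction L with
  | nil => intro z acc; simp [pvXorF]
  | cons x L ih =>
    intro z acc
    rw [List.foldl_cons, List.filter_cons]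
    by_cases hx : x ∈ c
    · rw [if_neg (by simpa using hx), if_neg (by simpa using hx)]
      exact ih z acc
    · rw [if_pos hx, if_pos (by simpa using hx)]
      simpa [pvXorF] using ih (PySem.Int.bxor z (g x)) (acc ++ [g x])

-- A's and_val expression
theorem pvAndMatch (nums : List Int) (c : List Int) :
    (match c with
      | [] => (0 : Int)
      | i :: rest => rest.foldl (fun a j => PySem.Int.band a (PySem.List.pyGetD nums j 0))
          (PySem.List.pyGetD nums i 0))
      = pvAnd0 (c.map (pvG nums)) := by
  cases c with
  | nil => rfl
  | cons i rest => simp [pvAnd0, List.foldl_map, pvG]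

theorem pvCombosP_fst (l : List Int) : ∀ r, (pvCombosP l r).map Prod.fst = PySem.List.combinations l r := by
  induction l with
  | nil =>
    intro r
    cases r with
    | zero => simp [pvCombosP, PySem.List.combinations_zero]
    | succ r => simp [pvCombosP, PySem.List.combinations_nil_succ]
  | cons x xs ih =>
    intro r
    cases r with
    | zero => simp [pvCombosP, PySem.List.combinations_zero]
    | succ r =>
      rw [show pvCombosP (x :: xs) (r + 1)
          = (pvCombosP xs r).map (fun p => (x :: p.1, p.2)) ++ (pvCombosP xs (r + 1)).map (fun p => (p.1, x :: p.2)) from rfl,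
        PySem.List.combinations_cons_succ]
      simp only [List.map_append, List.map_map]
      rw [← ih r, ← ih (r + 1)]
      simp [Function.comp_def]

theorem pvCombosP_mem (l : List Int) : ∀ (r : Nat), ∀ p ∈ pvCombosP l r,
    p.1.Sublist l ∧ (l.Nodup → l.filter (fun i => decide (i ∉ p.1)) = p.2) := by
  induction l with
  | nil =>
    intro r p hp
    cases r with
    | zero => simp [pvCombosP] at hp; subst hp; simp
    | succ r => simp [pvCombosP] at hp
  | cons x xs ih =>
    intro r p hp
    cases r with
    | zero =>
      simp [pvCombosP] at hp; subst hp
      constructor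
      · simp
      · intro _
        apply List.filter_eq_self.2
        intro a _; simp
    | succ r =>
      rw [show pvCombosP (x :: xs) (r + 1)
          = (pvCombosP xs r).map (fun p => (x :: p.1, p.2)) ++ (pvCombosP xs (r + 1)).map (fun p => (p.1, x :: p.2)) from rfl] at hp
      rcases List.mem_append.1 hp with h | h
      · rcases List.mem_map.1 h with ⟨q, hq, rfl⟩
        obtain ⟨hsub, hfil⟩ := ih r q hq
        refine ⟨hsub.cons₂ x, ?_⟩
        intro hnd
        have hxxs : x ∉ xs := (List.nodup_cons.1 hnd).1
        rw [List.filter_cons, if_neg (by simp)]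
        have : xs.filter (fun i => decide (i ∉ x :: q.1)) = xs.filter (fun i => decide (i ∉ q.1)) := by
          apply List.filter_congr
          intro a ha
          have : a ≠ x := fun h => hxxs (h ▸ ha)
          simp [List.mem_cons, this]
        rw [this, hfil (List.nodup_cons.1 hnd).2]
      · rcases List.mem_map.1 h with ⟨q, hq, rfl⟩
        obtain ⟨hsub, hfil⟩ := ih (r + 1) q hq
        refine ⟨hsub.cons x, ?_⟩
        intro hnd
        have hxxs : x ∉ xs := (List.nodup_cons.1 hnd).1
        have hxq : x ∉ q.1 := fun h => hxxs (hsub.subset h)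
        rw [List.filter_cons, if_pos (by simpa using hxq), hfil (List.nodup_cons.1 hnd).2]

theorem pvCAll_succ (l : List Int) (k : Nat) :
    pvCAll l (k + 1) = pvCAll l k ++ pvCombosP l (k + 1) := by
  simp [pvCAll, List.range_succ, List.flatMap_append]

theorem pvCAll_nil (k : Nat) : pvCAll [] k = [([], [])] := by
  induction k with
  | zero => rfl
  | succ k ih => rw [pvCAll_succ, ih]; rfl

theorem pvShuffle {α : Type} (A B C D : List α) :
    (A ++ B ++ (C ++ D)).Perm ((A ++ D) ++ (B ++ C)) := by
  have h1 : (A ++ B ++ (C ++ D)) = A ++ (B ++ C ++ D) := by simp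
  have h2 : ((A ++ D) ++ (B ++ C)) = A ++ (D ++ (B ++ C)) := by simp
  rw [h1, h2]
  exact (List.Perm.append_left A (List.perm_append_comm (l₁ := B ++ C) (l₂ := D)))

theorem pvCAll_cons (x : Int) (xs : List Int) : ∀ k : Nat,
    (pvCAll (x :: xs) k).Perm
      ((pvCAll xs k).map (fun p => (p.1, x :: p.2)) ++
       ((List.range k).flatMap (fun r => pvCombosP xs r)).map (fun p => (x :: p.1, p.2))) := by
  intro k
  induction k with
  | zero => simp [pvCAll, pvCombosP]
  | succ k ih =>
    rw [pvCAll_succ, pvCAll_succ xs k, List.range_succ, List.flatMap_append]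
    rw [show pvCombosP (x :: xs) (k + 1)
        = (pvCombosP xs k).map (fun p => (x :: p.1, p.2)) ++ (pvCombosP xs (k + 1)).map (fun p => (p.1, x :: p.2)) from rfl]
    refine (ih.append_right _).trans ?_
    have := pvShuffle ((pvCAll xs k).map (fun p => (p.1, x :: p.2)))
      (((List.range k).flatMap (fun r => pvCombosP xs r)).map (fun p => (x :: p.1, p.2)))
      ((pvCombosP xs k).map (fun p => (x :: p.1, p.2)))
      ((pvCombosP xs (k + 1)).map (fun p => (p.1, x :: p.2)))
    refine this.trans ?_
    simp only [List.map_append, List.flatMap_singleton]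
    exact List.Perm.refl _

theorem pvPick_perm (l : List Int) : ∀ k, (pvPick l k).Perm (pvCAll l k) := by
  induction l with
  | nil => intro k; rw [pvCAll_nil]; exact List.Perm.refl _
  | cons x xs ih =>
    intro k
    refine List.Perm.trans ?_ (pvCAll_cons x xs k).symm
    rw [show pvPick (x :: xs) k
        = (pvPick xs k).map (fun p => (p.1, x :: p.2)) ++
          (if 0 < k then (pvPick xs (k - 1)).map (fun p => (x :: p.1, p.2)) else []) from rfl]
    cases k with
    | zero =>
      simp only [Nat.lt_irrefl, if_false, List.range_zero, List.flatMap_nil, List.map_nil]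
      exact ((ih 0).map _).append_right _
    | succ k =>
      rw [if_pos (Nat.succ_pos k)]
      refine List.Perm.append ((ih (k + 1)).map _) ?_
      have : (List.range (k + 1)).flatMap (fun r => pvCombosP xs r) = pvCAll xs k := rfl
      rw [this]
      exact ((ih (k + 1 - 1)).map _)

theorem pvPick_map (g : Int → Int) (l : List Int) : ∀ k,
    pvPick (l.map g) k = (pvPick l k).map (fun p => (p.1.map g, p.2.map g)) := by
  induction l with
  | nil => intro k; simp [pvPick]
  | cons v rest ih =>
    intro k
    rw [List.map_cons, show pvPick (g v :: rest.map g) k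
        = (pvPick (rest.map g) k).map (fun p => (p.1, g v :: p.2)) ++
          (if 0 < k then (pvPick (rest.map g) (k - 1)).map (fun p => (g v :: p.1, p.2)) else []) from rfl,
      show pvPick (v :: rest) k
        = (pvPick rest k).map (fun p => (p.1, v :: p.2)) ++
          (if 0 < k then (pvPick rest (k - 1)).map (fun p => (v :: p.1, p.2)) else []) from rfl]
    rw [ih k]
    by_cases hk : 0 < k
    · rw [if_pos hk, if_pos hk, ih (k - 1)]
      simp [List.map_map, Function.comp_def]
    · rw [if_neg hk, if_neg hk]
      simp [List.map_map, Function.comp_def]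

theorem pvIdx_eq (nums : List Int) :
    pvIdx nums = List.map (fun k : Nat => (k : Int)) (List.range nums.length) := by
  unfold pvIdx
  rw [PySem.List.len_eq, PySem.List.pyRange_zero_natCast]

theorem pvIdx_nodup (nums : List Int) : (pvIdx nums).Nodup := by
  rw [pvIdx_eq]
  exact List.Nodup.map (fun a b h => by exact_mod_cast h) List.nodup_range

theorem pvIdx_length (nums : List Int) : (pvIdx nums).length = nums.length := by
  simp [pvIdx_eq]

theorem pvIdx_map_g (nums : List Int) : (pvIdx nums).map (pvG nums) = nums := by
  simpa [pvIdx, pvG] using PySem.List.map_pyGetD_pyRange_zero nums 0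

-- an upper range whose blocks are all empty contributes nothing
theorem pvFlatMap_ext {α : Type} (h : Nat → List α) (M : Nat) :
    ∀ K, M ≤ K → (∀ r, M ≤ r → r < K → h r = []) →
    (List.range K).flatMap h = (List.range M).flatMap h := by
  intro K
  induction K with
  | zero => intro hMK _; simp_all
  | succ K ih =>
    intro hMK hnil
    rcases Nat.lt_or_ge M (K + 1) with hlt | hge
    · have hMK' : M ≤ K := by omega
      rw [List.range_succ, List.flatMap_append, ih hMK' (fun r h1 h2 => hnil r h1 (by omega))]
      simp [hnil K (by omega) (by omega)]
    · have : M = K + 1 := by omega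
      subst this; rfl

-- A as a fold of max over pvCAll of index partitions
theorem pvA_eq (nums : List Int) :
    maximizeXorAndXor nums
      = (pvCAll (pvIdx nums) 4).foldl (fun z p => max z (pvCandP nums p)) 0 := by
  have hstep : maximizeXorAndXor nums
      = (PySem.List.pyRange 0 (min 4 (PySem.List.len nums) + 1) 1).foldl (fun result r =>
          (PySem.List.combinations (pvIdx nums) r.toNat).foldl
            (fun result c => max result (pvCandA nums c)) result) 0 := by
    unfold maximizeXorAndXor
    have hg : pvG nums = fun i => PySem.List.pyGetD nums i 0 := rfl
    simp only [pvScan (fun i => PySem.List.pyGetD nums i 0), pvAndMatch, pvCandA, pvCand, pvIdx,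
      hg, List.nil_append]
  rw [hstep]
  have hM : min 4 (PySem.List.len nums) + 1 = ((min 4 nums.length + 1 : Nat) : Int) := by
    rw [PySem.List.len_eq]; push_cast; omega
  rw [hM, PySem.List.pyRange_zero_natCast, ← List.foldl_flatMap, List.flatMap_map]
  simp only [Int.toNat_natCast]
  have hext : (List.range 5).flatMap (fun r => PySem.List.combinations (pvIdx nums) r)
      = (List.range (min 4 nums.length + 1)).flatMap (fun r => PySem.List.combinations (pvIdx nums) r) := by
    apply pvFlatMap_ext _ _ 5 (by omega)
    intro r h1 h2
    apply PySem.List.combinations_eq_nil_of_length_lt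
    rw [pvIdx_length]
    omega
  rw [← hext]
  have hfst : (List.range 5).flatMap (fun r => PySem.List.combinations (pvIdx nums) r)
      = (pvCAll (pvIdx nums) 4).map Prod.fst := by
    rw [pvCAll, List.map_flatMap]
    exact (List.flatMap_congr (fun r _ => (pvCombosP_fst (pvIdx nums) r).symm))
  rw [hfst, List.foldl_map]
  apply PySem.List.foldl_congr_mem
  intro acc p hp
  rcases List.mem_flatMap.1 hp with ⟨r, _, hpr⟩
  obtain ⟨_, hfil⟩ := pvCombosP_mem (pvIdx nums) r p hpr
  rw [show pvCandA nums p.1 = pvCandP nums p from by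
    rw [pvCandA, pvCandP, hfil (pvIdx_nodup nums)]]

theorem maximizeXorAndXor_eq (nums : List Int) :
    maximizeXorAndXor nums = maximizeXorAndXor_alt nums := by
  rw [pvA_eq]
  have hperm : ((pvCAll (pvIdx nums) 4).map (pvCandP nums)).Perm
      ((pvPick (pvIdx nums) 4).map (pvCandP nums)) :=
    ((pvPick_perm (pvIdx nums) 4).map (pvCandP nums)).symm
  haveI hrc : RightCommutative (fun (z : Int) (p : List Int × List Int) => max z (pvCandP nums p)) :=
    ⟨fun b a₁ a₂ => max_right_comm b (pvCandP nums a₁) (pvCandP nums a₂)⟩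
  have h1 : (pvCAll (pvIdx nums) 4).foldl (fun z p => max z (pvCandP nums p)) 0
      = (pvPick (pvIdx nums) 4).foldl (fun z p => max z (pvCandP nums p)) 0 :=
    ((pvPick_perm (pvIdx nums) 4).symm.foldl_eq 0)
  rw [h1]
  have h2 : maximizeXorAndXor_alt nums
      = (pvPick nums 4).foldl (fun z p => max z (pvCandB none 0 [] p)) 0 := by
    rw [maximizeXorAndXor_alt]
    exact pvBest_eq nums 4 none 0 [] 0
  have h3 := pvPick_map (pvG nums) (pvIdx nums) 4
  rw [pvIdx_map_g] at h3
  rw [h2, h3, List.foldl_map]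
  apply PySem.List.foldl_congr_mem
  intro acc p _
  rw [show pvCandB none 0 [] (p.1.map (pvG nums), p.2.map (pvG nums)) = pvCandP nums p from by
    rw [pvCandB, pvCandP, pvAVal_andOpt_none, List.nil_append]]

-- ===== VERDICT (by name: the statement is the Claim_ definition above) =====
theorem maximizeXorAndXor_spec : Claim_equal_maximizeXorAndXor := by
  intro nums _
  exact maximizeXorAndXor_eq nums
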